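-- pv_equiv track=rewrite | github.com/mortyc126-debug/SHA | step23_planet_sha.py | full_path
-- ===== SOURCE A (Python) =====
-- N = 4
--
-- MASK = (1 << N) - 1
--
-- IV = [0x6, 0xB, 0x3, 0xA, 0x5, 0x9, 0x1, 0xF]
--
-- K = [0x4, 0x2, 0xB, 0x7, 0xA, 0x3, 0xE, 0x5,
--      0x9, 0x1, 0xD, 0x6, 0x0, 0x8, 0xC, 0xF]
--
-- def rotr(x, s):
--     return ((x >> s) | (x << (N - s))) & MASK
--
-- def full_path(msg, R):
--     """Compute the FULL PATH of a message through R layers."""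
--     a, b, c, d, e, f, g, h = IV[:]
--     W = list(msg) + [0] * max(0, R - len(msg))
--     path = [(a, e)]  # Track (a, e) as the "position" at each layer
--
--     for r in range(R):
--         w_r = W[r] if r < len(W) else 0
--         k_r = K[r % len(K)]
--         sig1 = rotr(e, 1) ^ rotr(e, 3) ^ (e >> 1)
--         ch = (e & f) ^ (~e & g) & MASK
--         sig0 = rotr(a, 1) ^ rotr(a, 2) ^ rotr(a, 3)
--         maj = (a & b) ^ (a & c) ^ (b & c)
--         T1 = (h + sig1 + ch + k_r + w_r) & MASK
--         T2 = (sig0 + maj) & MASK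
--         a_new = (T1 + T2) & MASK
--         e_new = (d + T1) & MASK
--         h, g, f = g, f, e
--         e = e_new
--         d, c, b = c, b, a
--         a = a_new
--         path.append((a, e))
--
--     return path
-- ===== SOURCE B (Python) =====
-- N = 4
--
-- MASK = (1 << N) - 1
--
-- IV = [0x6, 0xB, 0x3, 0xA, 0x5, 0x9, 0x1, 0xF]
--
-- K = [0x4, 0x2, 0xB, 0x7, 0xA, 0x3, 0xE, 0x5,
--      0x9, 0x1, 0xD, 0x6, 0x0, 0x8, 0xC, 0xF]
--
-- def rotr(x, s):
--     return ((x >> s) | (x << (N - s))) & MASK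
--
-- def full_path(msg, R):
--     """Compute the FULL PATH of a message through R layers."""
--     # Table-driven: all bitwise round math is precomputed into two 4096-entry
--     # lookup tables indexed by nibble triples, and the per-round additive
--     # schedule K[r % 16] + w_r is built in a separate pass; the round loop
--     # itself then does only table lookups, additions and masking.
--     S1C = []  # (e, f, g) -> sig1(e) + ch(e, f, g)
--     SM = []   # (a, b, c) -> (sig0(a) + maj(a, b, c)) & MASK  (= T2)
--     for idx in range(4096):
--         x = idx // 256
--         y = idx // 16 % 16
--         z = idx % 16
--         sig1 = rotr(x, 1) ^ rotr(x, 3) ^ (x >> 1)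
--         ch = (x & y) ^ (~x & z) & MASK
--         S1C.append(sig1 + ch)
--         sig0 = rotr(x, 1) ^ rotr(x, 2) ^ rotr(x, 3)
--         maj = (x & y) ^ (x & z) ^ (y & z)
--         SM.append((sig0 + maj) & MASK)
--     kw = [K[r % 16] + (msg[r] if r < len(msg) else 0) for r in range(R)]
--     a, b, c, d, e, f, g, h = IV
--     path = [(a, e)]
--     for t in kw:
--         T1 = (h + S1C[e * 256 + f * 16 + g] + t) & MASK
--         a, b, c, d, e, f, g, h = (T1 + SM[a * 256 + b * 16 + c]) & MASK, a, b, c, (d + T1) & MASK, e, f, g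
--         path.append((a, e))
--     return path
-- ===== Notes on version B (the rewrite author's own statement) =====
-- stated objective: faster
-- what changed: B is table-driven: all bitwise round math (sig0/sig1/ch/maj) is precomputed into two 4096-entry nibble-triple lookup tables and the additive schedule K[r%16]+w_r is built in a separate pass, so the round loop does only table lookups, adds and masks instead of recomputing five rotations and the boolean functions each round.
import Mathlib
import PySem

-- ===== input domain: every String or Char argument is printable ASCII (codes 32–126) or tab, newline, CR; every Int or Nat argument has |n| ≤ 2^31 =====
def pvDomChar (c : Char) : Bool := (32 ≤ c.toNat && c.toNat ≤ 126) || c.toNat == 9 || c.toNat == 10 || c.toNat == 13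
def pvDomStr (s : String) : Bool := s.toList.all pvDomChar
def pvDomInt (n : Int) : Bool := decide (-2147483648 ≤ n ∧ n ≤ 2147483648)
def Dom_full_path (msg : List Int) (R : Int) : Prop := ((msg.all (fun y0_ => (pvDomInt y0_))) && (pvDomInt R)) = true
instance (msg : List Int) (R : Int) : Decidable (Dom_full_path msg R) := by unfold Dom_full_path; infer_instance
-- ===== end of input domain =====

-- B is table-driven: the per-round bitwise math is precomputed into two
-- 4096-entry nibble-triple lookup tables and the additive schedule
-- K[r%16]+w_r is built in a separate pass; the round loop then does only
-- table lookups, additions and masks.  Objective: faster (constant factor).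

-- ===== PORT A =====
def pvK : List Int := [0x4, 0x2, 0xB, 0x7, 0xA, 0x3, 0xE, 0x5, 0x9, 0x1, 0xD, 0x6, 0x0, 0x8, 0xC, 0xF]

def pvRotr (x : Int) (s : Nat) : Int :=
  PySem.Int.band (PySem.Int.bor (x >>> s) (x <<< (4 - s))) 15

-- the `for r in range(R)` loop of A, carrying the eight registers and the path
def pvLoopA (W : List Int) : Nat → Nat → Int → Int → Int → Int → Int → Int → Int → Int → List (Int × Int) → List (Int × Int)
  | _, 0, _, _, _, _, _, _, _, _, path => path
  | r, fuel+1, a, b, c, d, e, f, g, h, path =>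
    let w_r := if (r : Int) < (W.length : Int) then W.getD r 0 else 0
    let k_r := pvK.getD (r % 16) 0
    let sig1 := PySem.Int.bxor (PySem.Int.bxor (pvRotr e 1) (pvRotr e 3)) (e >>> 1)
    let ch := PySem.Int.bxor (PySem.Int.band e f) (PySem.Int.band (PySem.Int.band (Int.not e) g) 15)
    let sig0 := PySem.Int.bxor (PySem.Int.bxor (pvRotr a 1) (pvRotr a 2)) (pvRotr a 3)
    let maj := PySem.Int.bxor (PySem.Int.bxor (PySem.Int.band a b) (PySem.Int.band a c)) (PySem.Int.band b c)
    let T1 := PySem.Int.band (h + sig1 + ch + k_r + w_r) 15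
    let T2 := PySem.Int.band (sig0 + maj) 15
    let a_new := PySem.Int.band (T1 + T2) 15
    let e_new := PySem.Int.band (d + T1) 15
    pvLoopA W (r+1) fuel a_new a b c e_new e f g (path ++ [(a_new, e_new)])

def full_path (msg : List Int) (R : Int) : List (Int × Int) :=
  let W := msg ++ List.replicate (max 0 (R - (msg.length : Int))).toNat 0
  pvLoopA W 0 R.toNat 0x6 0xB 0x3 0xA 0x5 0x9 0x1 0xF [(0x6, 0x5)]

-- ===== PORT B =====
-- the two lookup tables of Source B: index = x*256 + y*16 + z over nibble triples
def pvTabS1C : List Int :=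
  (PySem.List.pyRange 0 4096 1).map fun idx =>
    let x := PySem.Int.floordiv idx 256
    let y := PySem.Int.mod (PySem.Int.floordiv idx 16) 16
    let z := PySem.Int.mod idx 16
    let sig1 := PySem.Int.bxor (PySem.Int.bxor (pvRotr x 1) (pvRotr x 3)) (x >>> 1)
    let ch := PySem.Int.bxor (PySem.Int.band x y) (PySem.Int.band (PySem.Int.band (Int.not x) z) 15)
    sig1 + ch

def pvTabSM : List Int :=
  (PySem.List.pyRange 0 4096 1).map fun idx =>
    let x := PySem.Int.floordiv idx 256
    let y := PySem.Int.mod (PySem.Int.floordiv idx 16) 16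
    let z := PySem.Int.mod idx 16
    let sig0 := PySem.Int.bxor (PySem.Int.bxor (pvRotr x 1) (pvRotr x 2)) (pvRotr x 3)
    let maj := PySem.Int.bxor (PySem.Int.bxor (PySem.Int.band x y) (PySem.Int.band x z)) (PySem.Int.band y z)
    PySem.Int.band (sig0 + maj) 15

-- the `for t in kw` loop of Source B: structural recursion over the schedule
def pvLoopB : List Int → Int × Int × Int × Int × Int × Int × Int × Int → List (Int × Int) → List (Int × Int)
  | [], _, path => path
  | t :: ts, (a, b, c, d, e, f, g, h), path =>
    let T1 := PySem.Int.band (h + PySem.List.pyGetD pvTabS1C (e * 256 + f * 16 + g) 0 + t) 15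
    let a' := PySem.Int.band (T1 + PySem.List.pyGetD pvTabSM (a * 256 + b * 16 + c) 0) 15
    let e' := PySem.Int.band (d + T1) 15
    pvLoopB ts (a', a, b, c, e', e, f, g) (path ++ [(a', e')])

def full_path_alt (msg : List Int) (R : Int) : List (Int × Int) :=
  let kw := (PySem.List.pyRange 0 R 1).map fun r =>
    PySem.List.pyGetD pvK (PySem.Int.mod r 16) 0
      + (if r < (msg.length : Int) then PySem.List.pyGetD msg r 0 else 0)
  pvLoopB kw (0x6, 0xB, 0x3, 0xA, 0x5, 0x9, 0x1, 0xF) [(0x6, 0x5)]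

-- ===== PRECONDITION & SPEC =====
def Spec_full_path (msg : List Int) (R : Int) (out : List (Int × Int)) : Prop := out = full_path_alt msg R
instance (msg : List Int) (R : Int) (out : List (Int × Int)) : Decidable (Spec_full_path msg R out) := by unfold Spec_full_path; infer_instance

-- ===== CLAIM (what is proved, stated in full; the proofs are below) =====
def Claim_equal_full_path : Prop := ∀ (msg : List Int) (R : Int), Dom_full_path msg R → Spec_full_path msg R (full_path msg R)

-- ===== LEMMAS AND PROOFS =====

lemma pv_band15_bounds (x : Int) : 0 ≤ PySem.Int.band x 15 ∧ PySem.Int.band x 15 < 16 := by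
  have h15 : Int.toNat 15 = 15 := rfl
  unfold PySem.Int.band
  split_ifs with h1 h2 h2 <;> try omega
  · have h := Nat.and_le_right (n := x.toNat) (m := Int.toNat 15)
    omega

-- nibble decomposition of a table index
lemma pv_idx_proj (e f g : Int) (he0 : 0 ≤ e) (he : e < 16) (hf0 : 0 ≤ f) (hf : f < 16)
    (hg0 : 0 ≤ g) (hg : g < 16) :
    PySem.Int.floordiv (e * 256 + f * 16 + g) 256 = e
    ∧ PySem.Int.mod (PySem.Int.floordiv (e * 256 + f * 16 + g) 16) 16 = f
    ∧ PySem.Int.mod (e * 256 + f * 16 + g) 16 = g := by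
  rw [PySem.Int.floordiv_eq_ediv_of_pos (by omega), PySem.Int.floordiv_eq_ediv_of_pos (by omega),
      PySem.Int.mod_eq_emod_of_pos (by omega), PySem.Int.mod_eq_emod_of_pos (by omega)]
  omega

lemma pv_tab_s1c (e f g : Int) (he0 : 0 ≤ e) (he : e < 16) (hf0 : 0 ≤ f) (hf : f < 16)
    (hg0 : 0 ≤ g) (hg : g < 16) :
    PySem.List.pyGetD pvTabS1C (e * 256 + f * 16 + g) 0
      = PySem.Int.bxor (PySem.Int.bxor (pvRotr e 1) (pvRotr e 3)) (e >>> 1)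
        + PySem.Int.bxor (PySem.Int.band e f) (PySem.Int.band (PySem.Int.band (Int.not e) g) 15) := by
  obtain ⟨h1, h2, h3⟩ := pv_idx_proj e f g he0 he hf0 hf hg0 hg
  unfold pvTabS1C
  rw [PySem.List.pyGetD_map_pyRange_of_nonneg _ 4096 _ _ (by omega) (by omega)]
  simp only [h1, h2, h3]

lemma pv_tab_sm (a b c : Int) (ha0 : 0 ≤ a) (ha : a < 16) (hb0 : 0 ≤ b) (hb : b < 16)
    (hc0 : 0 ≤ c) (hc : c < 16) :
    PySem.List.pyGetD pvTabSM (a * 256 + b * 16 + c) 0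
      = PySem.Int.band (PySem.Int.bxor (PySem.Int.bxor (pvRotr a 1) (pvRotr a 2)) (pvRotr a 3)
          + PySem.Int.bxor (PySem.Int.bxor (PySem.Int.band a b) (PySem.Int.band a c)) (PySem.Int.band b c)) 15 := by
  obtain ⟨h1, h2, h3⟩ := pv_idx_proj a b c ha0 ha hb0 hb hc0 hc
  unfold pvTabSM
  rw [PySem.List.pyGetD_map_pyRange_of_nonneg _ 4096 _ _ (by omega) (by omega)]
  simp only [h1, h2, h3]

-- A's padded-W fetch equals B's direct fetch from msg
lemma pv_w_eq (msg : List Int) (k : Nat) (r : Nat) :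
    (if (r : Int) < ((msg ++ List.replicate k 0).length : Int) then (msg ++ List.replicate k 0).getD r 0 else 0)
      = (if (r : Int) < (msg.length : Int) then msg.getD r 0 else 0) := by
  have hlen : (msg ++ List.replicate k 0).length = msg.length + k := by simp
  split_ifs with h1 h2 h2
  · have hm : r < msg.length := by exact_mod_cast h2
    rw [List.getD, List.getD, List.getElem?_append_left hm]
  · have hr : ¬ r < msg.length := by exact_mod_cast h2
    rw [hlen] at h1
    have hW : r < msg.length + k := by exact_mod_cast h1
    rw [List.getD, List.getElem?_append_right (by omega : msg.length ≤ r), List.getElem?_replicate]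
    rcases Nat.lt_or_ge (r - msg.length) k with h | h
    · rw [if_pos h]; rfl
    · rw [if_neg (Nat.not_lt.mpr h)]; rfl
  · exfalso
    rw [hlen] at h1
    have hm : r < msg.length := by exact_mod_cast h2
    exact h1 (by push_cast; omega)
  · rfl

-- B's schedule entry at round r equals A's k_r + w_r
lemma pv_sched_eq (msg : List Int) (r : Nat) :
    PySem.List.pyGetD pvK (PySem.Int.mod (r : Int) 16) 0
        + (if (r : Int) < (msg.length : Int) then PySem.List.pyGetD msg (r : Int) 0 else 0)
      = pvK.getD (r % 16) 0 + (if (r : Int) < (msg.length : Int) then msg.getD r 0 else 0) := by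
  have h16 : PySem.Int.mod (r : Int) 16 = ((r % 16 : Nat) : Int) := by
    exact_mod_cast PySem.Int.mod_natCast r 16
  rw [h16, PySem.List.pyGetD_natCast, PySem.List.pyGetD_natCast]

-- main invariant: with all registers in [0,16), one A-round equals one B-round
lemma pv_loop_eq (msg : List Int) (k : Nat) :
    ∀ (n r : Nat) (a b c d e f g h : Int) (path : List (Int × Int)),
    0 ≤ a → a < 16 → 0 ≤ b → b < 16 → 0 ≤ c → c < 16 → 0 ≤ d → d < 16 →
    0 ≤ e → e < 16 → 0 ≤ f → f < 16 → 0 ≤ g → g < 16 → 0 ≤ h → h < 16 →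
    pvLoopA (msg ++ List.replicate k 0) r n a b c d e f g h path
      = pvLoopB ((List.range' r n).map fun (j : Nat) =>
          PySem.List.pyGetD pvK (PySem.Int.mod ((j : Nat) : Int) 16) 0
            + (if ((j : Nat) : Int) < (msg.length : Int) then PySem.List.pyGetD msg ((j : Nat) : Int) 0 else 0))
          (a, b, c, d, e, f, g, h) path := by
  intro n
  induction n with
  | zero => intro r a b c d e f g h path _ _ _ _ _ _ _ _ _ _ _ _ _ _ _ _; rfl
  | succ m ih =>
    intro r a b c d e f g h path ha0 ha hb0 hb hc0 hc hd0 hd he0 he hf0 hf hg0 hg hh0 hh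
    rw [List.range'_succ, List.map_cons]
    simp only [pvLoopA, pvLoopB, pv_w_eq msg k r, pv_sched_eq msg r,
      pv_tab_s1c e f g he0 he hf0 hf hg0 hg, pv_tab_sm a b c ha0 ha hb0 hb hc0 hc]
    have hT1 : PySem.Int.band (h + (PySem.Int.bxor (PySem.Int.bxor (pvRotr e 1) (pvRotr e 3)) (e >>> 1)
          + PySem.Int.bxor (PySem.Int.band e f) (PySem.Int.band (PySem.Int.band (Int.not e) g) 15))
          + (pvK.getD (r % 16) 0 + (if (r : Int) < (msg.length : Int) then msg.getD r 0 else 0))) 15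
        = PySem.Int.band (h + PySem.Int.bxor (PySem.Int.bxor (pvRotr e 1) (pvRotr e 3)) (e >>> 1)
          + PySem.Int.bxor (PySem.Int.band e f) (PySem.Int.band (PySem.Int.band (Int.not e) g) 15)
          + pvK.getD (r % 16) 0 + (if (r : Int) < (msg.length : Int) then msg.getD r 0 else 0)) 15 := by
      ring_nf
    rw [hT1]
    exact ih (r + 1) _ _ _ _ _ _ _ _ _
      (pv_band15_bounds _).1 (pv_band15_bounds _).2 ha0 ha hb0 hb hc0 hc
      (pv_band15_bounds _).1 (pv_band15_bounds _).2 he0 he hf0 hf hg0 hg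

-- ===== VERDICT (by name: the statement is the Claim_ definition above) =====
theorem full_path_spec : Claim_equal_full_path := by
  intro msg R _
  show full_path msg R = full_path_alt msg R
  unfold full_path full_path_alt
  rw [pv_loop_eq msg (max 0 (R - (msg.length : Int))).toNat R.toNat 0 6 11 3 10 5 9 1 15 [(6, 5)]
    (by norm_num) (by norm_num) (by norm_num) (by norm_num) (by norm_num) (by norm_num)
    (by norm_num) (by norm_num) (by norm_num) (by norm_num) (by norm_num) (by norm_num)
    (by norm_num) (by norm_num) (by norm_num) (by norm_num)]
  congr 1
  rw [PySem.List.pyRange_one, List.map_map, ← List.range_eq_range']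
  simp only [Int.sub_zero]
  refine List.map_congr_left fun j hj => ?_
  simp
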